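-- pv_equiv track=rewrite | github.com/shufangxun/Code | Leetcode/算法思想/贪心算法/数组中两个数相加相减最值问题.py | maxadd1
-- ===== SOURCE A (Python) =====
-- def maxadd1(nums):
--     # 初始化maxSum
--     if len(nums) == 0:
--         return None
--     if len(nums) == 1:
--         maxSum = nums[0]
--     else:
--         maxSum = nums[0] + nums[1]
--     # 先计算maxsum
--     # 贪心更新左边的值
--     i = 0
--     for j in range(1, len(nums)):
--         curSum = nums[i] + nums[j]
--         if curSum > maxSum:
--             maxSum = curSum
--         if nums[j] > nums[i]:
--             i = j
--     return maxSum
-- ===== SOURCE B (Python) =====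
-- def maxadd1(nums):
--     if not nums:
--         return None
--     if len(nums) == 1:
--         return nums[0]
--     s = sorted(nums)
--     return s[-1] + s[-2]
-- ===== Notes on version B (the rewrite author's own statement) =====
-- stated objective: simpler
-- what changed: Replaces A's greedy left-to-right scan that maintains a running max index and a running best pair sum with sorting the list and returning the sum of its two largest elements.
import Mathlib
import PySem

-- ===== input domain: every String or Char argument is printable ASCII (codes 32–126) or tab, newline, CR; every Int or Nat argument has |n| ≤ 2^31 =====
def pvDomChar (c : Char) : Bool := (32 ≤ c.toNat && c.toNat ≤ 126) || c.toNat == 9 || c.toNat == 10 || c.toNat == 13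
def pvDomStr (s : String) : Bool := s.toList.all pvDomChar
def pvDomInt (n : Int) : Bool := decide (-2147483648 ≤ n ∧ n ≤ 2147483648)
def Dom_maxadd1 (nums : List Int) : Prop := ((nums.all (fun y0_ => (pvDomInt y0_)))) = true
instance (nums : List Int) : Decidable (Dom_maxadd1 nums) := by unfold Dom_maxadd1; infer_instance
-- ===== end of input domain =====

-- B replaces A's greedy single scan (running max index + running best pair sum) by
-- sorting and adding the two largest elements — simpler, not claimed faster.

-- ===== PORT A =====
-- Loop body of A's `for j in range(1, len(nums))`; the state is (maxSum, i).
-- Every index looked up (p.2 and j) is in range on every input A accepts, so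
-- pyGetD with default 0 is exact here (the default is never returned).
def loopA (nums : List Int) (p : Int × Int) (j : Int) : Int × Int :=
  let curSum := PySem.List.pyGetD nums p.2 0 + PySem.List.pyGetD nums j 0
  (if curSum > p.1 then curSum else p.1,
   if PySem.List.pyGetD nums j 0 > PySem.List.pyGetD nums p.2 0 then j else p.2)

def maxadd1 (nums : List Int) : Option Int :=
  if nums.length = 0 then none
  else
    let maxSum : Int :=
      if nums.length = 1 then PySem.List.pyGetD nums 0 0
      else PySem.List.pyGetD nums 0 0 + PySem.List.pyGetD nums 1 0
    some ((PySem.List.pyRange 1 (nums.length : Int)).foldl (loopA nums) (maxSum, 0)).1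

-- ===== PORT B =====
def maxadd1_alt (nums : List Int) : Option Int :=
  if nums.length = 0 then none
  else if nums.length = 1 then some (PySem.List.pyGetD nums 0 0)
  else
    let s := PySem.List.sorted nums (fun x => x) false
    some (PySem.List.pyGetD s (-1) 0 + PySem.List.pyGetD s (-2) 0)

-- ===== PRECONDITION & SPEC =====
def Spec_maxadd1 (nums : List Int) (out : Option Int) : Prop := out = maxadd1_alt nums
instance (nums : List Int) (out : Option Int) : Decidable (Spec_maxadd1 nums out) := by unfold Spec_maxadd1; infer_instance

-- ===== CLAIM (what is proved, stated in full; the proofs are below) =====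
def Claim_equal_maxadd1 : Prop := ∀ (nums : List Int), Dom_maxadd1 nums → Spec_maxadd1 nums (maxadd1 nums)

-- ===== LEMMAS AND PROOFS =====

-- Proof-side "top two values so far" state machine.
inductive Top2 : Type
  | s0 : Top2
  | s1 : Int → Top2
  | s2 : Int → Int → Top2
deriving DecidableEq, Repr

def step2 : Top2 → Int → Top2
  | .s0, x => .s1 x
  | .s1 a, x => if x > a then .s2 x a else .s2 a x
  | .s2 a b, x => if x > a then .s2 x a else if x > b then .s2 a x else .s2 a b

-- Value-level version of A's loop body: state (maxSum, value at the running max index).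
def stepV (p : Int × Int) (x : Int) : Int × Int :=
  (if p.2 + x > p.1 then p.2 + x else p.1, if x > p.2 then x else p.2)

lemma step2_rc (s : Top2) (x y : Int) : step2 (step2 s x) y = step2 (step2 s y) x := by
  cases s <;> (try simp only [step2]) <;> (try split_ifs) <;> (try simp only [step2]) <;>
    (try split_ifs) <;> (try simp only [Top2.s2.injEq, true_and]) <;> omega

-- A's index-based loop computes the same maxSum as the value-level fold over the suffix.
lemma loopA_eq (nums : List Int) : ∀ (tl : List Int) (j : Nat) (m i : Int),
    nums.drop j = tl → 0 ≤ i → i.toNat < nums.length →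
    ((PySem.List.pyRange (j : Int) (nums.length : Int)).foldl (loopA nums) (m, i)).1
      = (tl.foldl stepV (m, PySem.List.pyGetD nums i 0)).1 := by
  intro tl
  induction tl with
  | nil =>
    intro j m i hdrop _ _
    have hj : nums.length ≤ j := by
      by_contra hlt
      have := List.drop_eq_nil_iff.mp hdrop
      omega
    rw [PySem.List.pyRange_one_eq_nil (by exact_mod_cast hj)]
    simp [List.foldl_nil]
  | cons x t ih =>
    intro j m i hdrop hi0 hilen
    have hjlt : j < nums.length := by
      by_contra hge
      rw [List.drop_eq_nil_iff.mpr (by omega)] at hdrop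
      simp at hdrop
    have hx : nums[j] = x ∧ nums.drop (j + 1) = t := by
      rw [← List.getElem_cons_drop hjlt] at hdrop
      exact ⟨(List.cons.injEq _ _ _ _ ▸ hdrop).1, (List.cons.injEq _ _ _ _ ▸ hdrop).2⟩
    have hgj : PySem.List.pyGetD nums (j : Int) 0 = x := by
      rw [PySem.List.pyGetD_natCast, List.getD_eq_getElem nums 0 hjlt]; exact hx.1
    have hgi : PySem.List.pyGetD nums i 0 = nums[i.toNat] := by
      rw [PySem.List.pyGetD_eq_getElem nums (i := i) 0 hi0 (by omega)]
    rw [PySem.List.pyRange_one_cons (by exact_mod_cast hjlt)]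
    rw [List.foldl_cons, List.foldl_cons]
    have hcast : (j : Int) + 1 = ((j + 1 : Nat) : Int) := by push_cast; ring
    by_cases hc : x > nums[i.toNat]
    · have hbody : loopA nums (m, i) (j : Int)
          = (if nums[i.toNat] + x > m then nums[i.toNat] + x else m, (j : Int)) := by
        simp only [loopA, hgj, hgi]
        rw [if_pos hc]
      rw [hbody, hcast]
      have := ih (j + 1) (if nums[i.toNat] + x > m then nums[i.toNat] + x else m) (j : Int)
        hx.2 (by omega) (by omega)
      rw [this]
      simp only [stepV, hgi]
      rw [if_pos hc]
      congr 1
      rw [PySem.List.pyGetD_natCast, List.getD_eq_getElem nums 0 hjlt, hx.1]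
    · have hbody : loopA nums (m, i) (j : Int)
          = (if nums[i.toNat] + x > m then nums[i.toNat] + x else m, i) := by
        simp only [loopA, hgj, hgi]
        rw [if_neg hc]
      rw [hbody, hcast]
      have := ih (j + 1) (if nums[i.toNat] + x > m then nums[i.toNat] + x else m) i
        hx.2 hi0 hilen
      rw [this]
      simp only [stepV, hgi]
      rw [if_neg hc]

-- A's value-level fold computes t1 + t2 of the top-two state machine.
lemma stepV_step2 : ∀ (r : List Int) (t1 t2 : Int), t2 ≤ t1 →
    (r.foldl stepV (t1 + t2, t1)).1
      = (match r.foldl step2 (.s2 t1 t2) with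
         | Top2.s2 a b => a + b
         | _ => 0) := by
  intro r
  induction r with
  | nil => intro t1 t2 h; simp [List.foldl]
  | cons x t ih =>
    intro t1 t2 h
    simp only [List.foldl_cons, stepV, step2]
    by_cases h1 : x > t1
    · rw [if_pos h1]
      have e1 : (if t1 + x > t1 + t2 then t1 + x else t1 + t2) = x + t1 := by
        rw [if_pos (by omega)]; ring
      rw [e1, if_pos h1]
      exact ih x t1 (by omega)
    · rw [if_neg h1]
      by_cases h2 : x > t2
      · rw [if_pos h2]
        have e1 : (if t1 + x > t1 + t2 then t1 + x else t1 + t2) = t1 + x := by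
          rw [if_pos (by omega)]
        rw [e1, if_neg h1]
        exact ih t1 x (by omega)
      · rw [if_neg h2]
        have e1 : (if t1 + x > t1 + t2 then t1 + x else t1 + t2) = t1 + t2 := by
          rw [if_neg (by omega)]
        rw [e1, if_neg h1]
        exact ih t1 t2 h

-- On a nondecreasing list of length ≥ 2 the state machine ends at (last, second-to-last).
lemma sortedFold : ∀ (s : List Int), 2 ≤ s.length → s.Pairwise (· ≤ ·) →
    s.foldl step2 .s0 = .s2 (s.getD (s.length - 1) 0) (s.getD (s.length - 2) 0) := by
  intro s
  induction s using List.reverseRecOn with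
  | nil => intro h; simp at h
  | append_singleton u x ih =>
    intro hlen hpw
    have hux : ∀ a ∈ u, a ≤ x := by
      have := (List.pairwise_append.mp hpw).2.2
      intro a ha; exact this a ha x (by simp)
    have hpu : u.Pairwise (· ≤ ·) := (List.pairwise_append.mp hpw).1
    rw [List.foldl_append]
    match u, hpu with
    | [], _ => simp at hlen
    | [y], _ =>
      have hyx : y ≤ x := hux y (by simp)
      simp only [List.foldl_cons, List.foldl_nil, step2]
      by_cases hc : x > y
      · rw [if_pos hc]; simp
      · rw [if_neg hc]
        have : x = y := by omega
        subst this; simp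
    | y :: z :: w, hpu =>
      have h2 : 2 ≤ (y :: z :: w).length := by simp
      rw [ih h2 hpu]
      have hl1 : (y :: z :: w).length - 1 < (y :: z :: w).length := by simp
      have hl2 : (y :: z :: w).length - 2 < (y :: z :: w).length := by
        simp only [List.length_cons]; omega
      set v := y :: z :: w with hv
      have hgl1 : v.getD (v.length - 1) 0 ∈ v := by
        rw [List.getD_eq_getElem v 0 hl1]; exact List.getElem_mem _
      have hgl2 : v.getD (v.length - 2) 0 ∈ v := by
        rw [List.getD_eq_getElem v 0 hl2]; exact List.getElem_mem _
      have hx1 : v.getD (v.length - 1) 0 ≤ x := hux _ hgl1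
      have hx2 : v.getD (v.length - 2) 0 ≤ x := hux _ hgl2
      have h21 : v.getD (v.length - 2) 0 ≤ v.getD (v.length - 1) 0 := by
        rw [List.getD_eq_getElem v 0 hl1, List.getD_eq_getElem v 0 hl2]
        exact List.pairwise_iff_getElem.mp hpu _ _ hl2 hl1
          (by simp only [hv, List.length_cons]; omega)
      have ga : (v ++ [x]).getD ((v ++ [x]).length - 1) 0 = x := by
        simp [List.getD_eq_getElem?_getD]
      have gb : (v ++ [x]).getD ((v ++ [x]).length - 2) 0 = v.getD (v.length - 1) 0 := by
        have : (v ++ [x]).length - 2 = v.length - 1 := by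
          simp only [hv, List.length_append, List.length_cons, List.length_nil]; omega
        rw [this, List.getD_eq_getElem v 0 hl1,
            List.getD_eq_getElem _ 0 (by
              simp only [hv, List.length_append, List.length_cons, List.length_nil]
              omega : v.length - 1 < (v ++ [x]).length)]
        exact (List.getElem_append_left hl1).symm ▸ rfl
      rw [ga, gb]
      simp only [List.foldl_cons, List.foldl_nil, step2]
      by_cases hc : x > v.getD (v.length - 1) 0
      · rw [if_pos hc]
      · rw [if_neg hc]
        have hx : x = v.getD (v.length - 1) 0 := by omega
        by_cases hc2 : x > v.getD (v.length - 2) 0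
        · rw [if_pos hc2, hx]
        · rw [if_neg hc2]
          have h2x : x = v.getD (v.length - 2) 0 := by omega
          rw [← hx, ← h2x]

-- ===== VERDICT (by name: the statement is the Claim_ definition above) =====
theorem maxadd1_spec : Claim_equal_maxadd1 := by
  intro nums _
  unfold Spec_maxadd1
  match nums with
  | [] => rfl
  | [a] =>
    simp [maxadd1, maxadd1_alt, PySem.List.pyRange_one_eq_nil (by norm_num : (1:Int) ≤ 1)]
  | a :: c :: r =>
    set nums := a :: c :: r with hnums
    have hlen : nums.length = r.length + 2 := by simp [hnums]
    have hA : maxadd1 nums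
        = some ((PySem.List.pyRange 1 (nums.length : Int)).foldl (loopA nums) (a + c, 0)).1 := by
      have hg0 : PySem.List.pyGetD nums 0 0 = a := by
        simp [hnums, PySem.List.pyGetD_zero_cons]
      have hg1 : PySem.List.pyGetD nums 1 0 = c := by
        simp [hnums, PySem.List.pyGetD, PySem.List.pyGet?, PySem.List.pyIdx?]
      simp only [maxadd1, hlen]
      rw [if_neg (by omega), if_neg (by omega), hg0, hg1]
    have hg0 : PySem.List.pyGetD nums 0 0 = a := by
      simp [hnums, PySem.List.pyGetD_zero_cons]
    have hg1 : PySem.List.pyGetD nums 1 0 = c := by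
      simp [hnums, PySem.List.pyGetD, PySem.List.pyGet?, PySem.List.pyIdx?]
    have hdrop2 : nums.drop 2 = r := by simp [hnums]
    have hAval : maxadd1 nums
        = some (match nums.foldl step2 .s0 with
                | Top2.s2 a b => a + b
                | _ => 0) := by
      rw [hA]
      rw [PySem.List.pyRange_one_cons (by rw [hlen]; push_cast; omega)]
      rw [List.foldl_cons]
      have hb1 : loopA nums (a + c, 0) 1 = (a + c, if c > a then 1 else 0) := by
        simp only [loopA, hg0, hg1]
        rw [if_neg (by omega)]
      rw [hb1]
      have hcast2 : (1 : Int) + 1 = ((2 : Nat) : Int) := by norm_num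
      have hfold0 : nums.foldl step2 .s0
          = r.foldl step2 (if c > a then Top2.s2 c a else Top2.s2 a c) := by
        simp only [hnums, List.foldl_cons, step2]
      rw [hfold0]
      by_cases hca : c > a
      · rw [if_pos hca, if_pos hca]
        have h1 := loopA_eq nums r 2 (a + c) 1 hdrop2 (by omega) (by rw [hlen]; omega)
        rw [hcast2, h1, hg1]
        have h2 := stepV_step2 r c a (by omega)
        rw [Int.add_comm a c, h2]
      · rw [if_neg hca, if_neg hca]
        have h1 := loopA_eq nums r 2 (a + c) 0 hdrop2 (by omega) (by rw [hlen]; omega)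
        rw [hcast2, h1, hg0]
        have h2 := stepV_step2 r a c (by omega)
        rw [h2]
    set s := PySem.List.sorted nums (fun x => x) false with hs
    have hslen : s.length = nums.length := PySem.List.length_sorted nums (fun x => x) false
    have hs2 : 2 ≤ s.length := by rw [hslen, hlen]; omega
    have hpw : s.Pairwise (· ≤ ·) := PySem.List.sorted_pairwise nums (fun x => x)
    have hfold : nums.foldl step2 .s0
        = .s2 (s.getD (s.length - 1) 0) (s.getD (s.length - 2) 0) := by
      rw [← List.Perm.foldl_eq' (PySem.List.sorted_perm nums (fun x => x) false)
        (fun x _ y _ z => step2_rc z x y) Top2.s0]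
      exact sortedFold s hs2 hpw
    have hB : maxadd1_alt nums
        = some (s.getD (s.length - 1) 0 + s.getD (s.length - 2) 0) := by
      simp only [maxadd1_alt, hlen]
      rw [if_neg (by omega), if_neg (by omega)]
      rw [PySem.List.pyGetD_neg_ofNat s 1 0 (by omega) (by omega),
          PySem.List.pyGetD_neg_ofNat s 2 0 (by omega) (by omega)]
      rw [List.getD_eq_getElem s 0 (by omega), List.getD_eq_getElem s 0 (by omega)]
    rw [hAval, hfold, hB]
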